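-- pv_equiv track=rewrite | github.com/birds-canopy/birdsong_tokenizer | src/visualisation_plots.py | filter_tokens_by_frequency
-- ===== SOURCE A (Python) =====
-- def count_token_presence_in_songs(Y_clean, token):
--     """
--     Compte dans combien de chants le token apparaît.
--
--     Args:
--         Y_clean: liste contenant tous les chants séparés par '#'
--         token: le token à chercher (ex: 'ZAB')
--
--     Returns:
--         nombre de chants contenant ce token
--     """
--     # Séparer les chants (diviser par '#')
--     songs = []
--     current_song = []
--
--     for label in Y_clean:
--         if label == '#':
--             if current_song:  # Si le chant n'est pas vide
--                 songs.append(current_song)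
--                 current_song = []
--         else:
--             current_song.append(label)
--
--     # Ajouter le dernier chant si il n'y a pas de '#' à la fin
--     if current_song:
--         songs.append(current_song)
--
--     # Compter dans combien de chants le token apparaît
--     count = 0
--     token_sequence = list(token)  # Convertir 'ZAB' en ['Z', 'A', 'B']
--
--     for song in songs:
--         # Chercher la séquence dans le chant
--         for i in range(len(song) - len(token_sequence) + 1):
--             if song[i:i+len(token_sequence)] == token_sequence:
--                 count += 1
--                 break  # On compte une seule fois par chant
--
--     return count
--
-- def filter_tokens_by_frequency(tokens, Y_clean, min_percentage=30):
--     """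
--     Filtre les tokens selon leur pourcentage de présence dans les chants.
--
--     Args:
--         tokens: liste des tokens à filtrer
--         Y_clean: liste contenant tous les chants séparés par '#'
--         min_percentage: pourcentage minimum de présence (défaut: 30%)
--
--     Returns:
--         ensemble des tokens suffisamment fréquents
--     """
--     # Compter le nombre total de chants
--     total_songs = Y_clean.count('#') + (1 if Y_clean and Y_clean[-1] != '#' else 0)
--
--     # Filtrer les tokens
--     frequent_tokens = set()
--     for token in tokens:
--         if token and token != "None":  # Ignorer les tokens vides ou None
--             token_clean = token.replace(" ", "").replace("#", "")
--             if token_clean and len(token_clean)>1:  # S'assurer que le token n'est pas vide après nettoyage et que c'est pas une seule phrase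
--                 presence_count = count_token_presence_in_songs(Y_clean, token_clean)
--                 presence_percentage = (presence_count / total_songs) * 100
--
--                 if presence_percentage >= min_percentage:
--                     frequent_tokens.add(token_clean)
--
--     return frequent_tokens
-- ===== SOURCE B (Python) =====
-- def filter_tokens_by_frequency(tokens, Y_clean, min_percentage=30):
--     def split_songs(labels):
--         # split on '#', dropping empty segments: skip '#'s, take each run up to the next '#'
--         songs = []
--         i, n = 0, len(labels)
--         while i < n:
--             if labels[i] == '#':
--                 i += 1
--             else:
--                 j = i + 1
--                 while j < n and labels[j] != '#':
--                     j += 1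
--                 songs.append(labels[i:j])
--                 i = j
--         return songs
--
--     def contains_run(song, seq):
--         # scan the suffixes of song for one that starts with seq
--         i, L, n = 0, len(seq), len(song)
--         while True:
--             if song[i:i + L] == seq:
--                 return True
--             if i == n:
--                 return False
--             i += 1
--
--     songs = split_songs(Y_clean)
--
--     # unique valid cleaned tokens, in first-occurrence order
--     seen = set()
--     candidates = []
--     for token in tokens:
--         if token and token != "None":
--             tc = token.replace(" ", "").replace("#", "")
--             if len(tc) > 1 and tc not in seen:
--                 seen.add(tc)
--                 candidates.append(tc)
--
--     # songs as the OUTER loop: one dict of per-token presence counts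
--     counts = {}
--     for song in songs:
--         for tc in candidates:
--             if contains_run(song, list(tc)):
--                 counts[tc] = counts.get(tc, 0) + 1
--
--     total_songs = Y_clean.count('#') + (1 if Y_clean and Y_clean[-1] != '#' else 0)
--     return {tc for tc in candidates
--             if (counts.get(tc, 0) / total_songs) * 100 >= min_percentage}
-- ===== Notes on version B (the rewrite author's own statement) =====
-- stated objective: faster
-- what changed: B splits Y_clean into songs once by a recursive take-until-'#' split (A re-runs its accumulator split loop for every token), dedupes the valid cleaned tokens up front, counts with the songs as the OUTER loop into one dict of presence counts, and tests token presence by scanning song suffixes for a prefix match instead of A's index-window loop.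
import Mathlib
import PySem

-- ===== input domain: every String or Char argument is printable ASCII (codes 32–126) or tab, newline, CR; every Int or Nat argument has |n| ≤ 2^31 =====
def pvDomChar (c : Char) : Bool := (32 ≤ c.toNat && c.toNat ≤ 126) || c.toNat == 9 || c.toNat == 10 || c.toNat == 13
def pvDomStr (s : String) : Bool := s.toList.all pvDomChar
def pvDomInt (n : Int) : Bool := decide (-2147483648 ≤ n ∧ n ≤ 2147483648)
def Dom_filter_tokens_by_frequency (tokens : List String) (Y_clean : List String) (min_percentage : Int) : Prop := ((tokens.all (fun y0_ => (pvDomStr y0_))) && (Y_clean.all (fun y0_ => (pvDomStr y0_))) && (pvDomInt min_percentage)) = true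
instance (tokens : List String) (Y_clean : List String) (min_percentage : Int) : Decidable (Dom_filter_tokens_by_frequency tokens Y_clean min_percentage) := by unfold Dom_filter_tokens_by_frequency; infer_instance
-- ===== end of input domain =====

-- B splits the songs once with a recursive take-until-'#' split, dedupes the valid cleaned tokens up front,
-- counts with the songs as the OUTER loop into one dict, and tests presence by scanning song suffixes for a
-- prefix match — instead of A's per-token re-split and index-window scans; return values proved equal.

-- ===== helpers whose Python text is identical in A and B =====

-- list(token): the characters of the token as 1-character strings
def pvSeq (token : String) : List String := token.toList.map (fun ch => String.ofList [ch])

-- token.replace(" ", "").replace("#", "")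
def pvClean (token : String) : String := PySem.Str.replace (PySem.Str.replace token " " "") "#" ""

-- Y_clean.count('#') + (1 if Y_clean and Y_clean[-1] != '#' else 0)   (identical in both Pythons)
def pvTotalSongs (Y_clean : List String) : Int :=
  (Y_clean.count "#" : Int) + (if Y_clean ≠ [] ∧ Y_clean.getLast? ≠ some "#" then 1 else 0)

-- nearest-even rounding of a/b (a ≥ 0, b > 0)
def pvRndDiv (a b : Nat) : Nat :=
  let q := a / b
  let r := a % b
  if b < 2 * r then q + 1 else if 2 * r < b then q else q + q % 2

-- n.bit_length() for n < 2^64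
def pvBitLen (n : Nat) : Nat :=
  (List.range 64).foldl (fun acc i => if 2 ^ i ≤ n then i + 1 else acc) 0

-- EXACT integer model of Python's float test '(c/t)*100 >= m' (identical expression in both Pythons):
-- round c/t to the nearest double (53-bit significand, nearest-even), multiply by 100, round again,
-- compare exactly. Exact for 0 ≤ c ≤ t, 0 < t < 2^62 (the values reachable here: presence counts vs totals).
def pvFloatGE (c t m : Int) : Bool :=
  if c = 0 then decide (m ≤ 0)
  else
    let cn := c.toNat
    let tn := t.toNat
    let k0 := 52 + pvBitLen tn - pvBitLen cn
    let k := if cn * 2 ^ k0 < tn * 2 ^ 52 then k0 + 1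
             else if tn * 2 ^ 53 ≤ cn * 2 ^ k0 then k0 - 1 else k0
    let a := pvRndDiv (cn * 2 ^ k) tn
    let n := 100 * a
    let s := pvBitLen n
    if 53 < s then
      decide (m * 2 ^ (k - (s - 53)) ≤ (pvRndDiv n (2 ^ (s - 53)) : Int))
    else
      decide (m * 2 ^ k ≤ (n : Int))

-- ===== PORT A =====

-- A's song-splitting loop: accumulate non-'#' labels, flush non-empty songs
def pvSplitSongs (Y : List String) : List (List String) :=
  let st := Y.foldl (fun (st : List (List String) × List String) label =>
    if label = "#" then
      (if st.2 ≠ [] then (st.1 ++ [st.2], ([] : List String)) else st)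
    else (st.1, st.2 ++ [label])) ([], [])
  if st.2 ≠ [] then st.1 ++ [st.2] else st.1

-- A's inner scan-with-break: does any window song[i:i+len(seq)] equal seq?
def pvHasSeq (song seq : List String) : Bool :=
  (PySem.List.pyRange 0 ((song.length : Int) - (seq.length : Int) + 1) 1).any
    (fun i => PySem.List.slice song (some i) (some (i + (seq.length : Int))) == seq)

def count_token_presence_in_songs (Y_clean : List String) (token : String) : Int :=
  let songs := pvSplitSongs Y_clean
  let token_sequence := pvSeq token
  songs.foldl (fun count song => if pvHasSeq song token_sequence then count + 1 else count) 0

def filter_tokens_by_frequency (tokens : List String) (Y_clean : List String) (min_percentage : Int) : List String :=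
  let total_songs := pvTotalSongs Y_clean
  tokens.foldl (fun (acc : PySem.Set String) token =>
    if token ≠ "" ∧ token ≠ "None" then
      let token_clean := pvClean token
      if token_clean ≠ "" ∧ 1 < token_clean.toList.length then
        if pvFloatGE (count_token_presence_in_songs Y_clean token_clean) total_songs min_percentage
        then PySem.Set.add acc token_clean else acc
      else acc
    else acc) PySem.Set.empty

-- ===== PORT B =====

-- B's recursive split: drop leading '#', take the run up to the next '#', recurse on the rest
def pvSongsB : List String → List (List String)
  | [] => []
  | first :: rest =>
    if first = "#" then pvSongsB rest
    else (first :: rest.takeWhile (fun l => l ≠ "#")) :: pvSongsB (rest.dropWhile (fun l => l ≠ "#"))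
termination_by labels => labels.length
decreasing_by
  · simp
  · have := List.length_dropWhile_le (fun l => decide (l ≠ "#")) rest
    simp at this ⊢; omega

-- B's presence test: scan the suffixes of song for one that starts with seq
def pvHasRun : List String → List String → Bool
  | song, seq =>
    if song.take seq.length == seq then true
    else
      match song with
      | [] => false
      | _ :: rest => pvHasRun rest seq
termination_by song _ => song.length

def filter_tokens_by_frequency_alt (tokens : List String) (Y_clean : List String) (min_percentage : Int) : List String :=
  let songs := pvSongsB Y_clean
  let sc := tokens.foldl (fun (st : PySem.Set String × List String) token =>
      if token ≠ "" ∧ token ≠ "None" then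
        let tc := pvClean token
        if 1 < tc.toList.length ∧ tc ∉ st.1 then
          (PySem.Set.add st.1 tc, st.2 ++ [tc])
        else st
      else st) (PySem.Set.empty, [])
  let candidates := sc.2
  let counts := songs.foldl (fun (d : PySem.Dict String Int) song =>
      candidates.foldl (fun d tc =>
        if pvHasRun song (pvSeq tc) then d.modify tc 0 (· + 1) else d) d)
    PySem.Dict.empty
  let total_songs := pvTotalSongs Y_clean
  PySem.Set.ofList (candidates.filter
    (fun tc => pvFloatGE (counts.getD tc 0) total_songs min_percentage))

-- ===== PRECONDITION & SPEC =====
-- a token that survives A's cleaning and reaches the division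
def pvValidTok (token : String) : Bool :=
  decide (token ≠ "" ∧ token ≠ "None" ∧
    1 < (PySem.Str.replace (PySem.Str.replace token " " "") "#" "").toList.length)

-- Pre_ excludes exactly the inputs on which A raises ZeroDivisionError:
-- Y_clean = [] gives total_songs = 0, and any token surviving the cleaning then divides by it.
def Pre_filter_tokens_by_frequency (tokens : List String) (Y_clean : List String) (min_percentage : Int) : Prop :=
  Y_clean ≠ [] ∨ ∀ t ∈ tokens, pvValidTok t = false
instance (tokens : List String) (Y_clean : List String) (min_percentage : Int) : Decidable (Pre_filter_tokens_by_frequency tokens Y_clean min_percentage) := by unfold Pre_filter_tokens_by_frequency; infer_instance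

def pvWitness_filter_tokens_by_frequency : List String × List String × Int := (["ab", "cd"], ["a", "b", "#", "a"], 30)

def Spec_filter_tokens_by_frequency (tokens : List String) (Y_clean : List String) (min_percentage : Int) (out : List String) : Prop := out = filter_tokens_by_frequency_alt tokens Y_clean min_percentage
instance (tokens : List String) (Y_clean : List String) (min_percentage : Int) (out : List String) : Decidable (Spec_filter_tokens_by_frequency tokens Y_clean min_percentage out) := by unfold Spec_filter_tokens_by_frequency; infer_instance

-- ===== CLAIM (what is proved, stated in full; the proofs are below) =====
def Claim_equal_filter_tokens_by_frequency : Prop := ∀ (tokens : List String) (Y_clean : List String) (min_percentage : Int), Dom_filter_tokens_by_frequency tokens Y_clean min_percentage → Pre_filter_tokens_by_frequency tokens Y_clean min_percentage → Spec_filter_tokens_by_frequency tokens Y_clean min_percentage (filter_tokens_by_frequency tokens Y_clean min_percentage)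

-- ===== LEMMAS AND PROOFS =====

-- ===== the two splits compute the same songs =====

-- A's loop step and final flush, named for the induction
def pvStepA (st : List (List String) × List String) (label : String) : List (List String) × List String :=
  if label = "#" then
    (if st.2 ≠ [] then (st.1 ++ [st.2], ([] : List String)) else st)
  else (st.1, st.2 ++ [label])

def pvFlush (st : List (List String) × List String) : List (List String) :=
  if st.2 ≠ [] then st.1 ++ [st.2] else st.1

theorem splitA_general (Y : List String) : ∀ (acc : List (List String)) (cur : List String),
    pvFlush (Y.foldl pvStepA (acc, cur))
    = acc ++ (if cur = [] then pvSongsB Y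
        else (cur ++ Y.takeWhile (fun l => l ≠ "#")) :: pvSongsB (Y.dropWhile (fun l => l ≠ "#"))) := by
  induction Y with
  | nil =>
    intro acc cur
    by_cases h : cur = [] <;> simp [h, pvFlush, pvSongsB]
  | cons l Y ih =>
    intro acc cur
    rw [List.foldl_cons]
    by_cases hl : l = "#"
    · subst hl
      by_cases hc : cur = []
      · subst hc
        have hs : pvStepA (acc, []) "#" = (acc, []) := by simp [pvStepA]
        rw [hs, ih acc []]
        simp [pvSongsB]
      · have hs : pvStepA (acc, cur) "#" = (acc ++ [cur], []) := by simp [pvStepA, hc]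
        rw [hs, ih (acc ++ [cur]) []]
        simp [hc, pvSongsB]
    · have hs : pvStepA (acc, cur) l = (acc, cur ++ [l]) := by simp [pvStepA, hl]
      rw [hs, ih acc (cur ++ [l])]
      by_cases hc : cur = []
      · subst hc
        simp only [List.nil_append, if_neg (by simp : ¬ ([l] = []))]
        conv_rhs => rw [pvSongsB]
        simp [hl]
      · simp [hc, hl]

theorem songsB_eq (Y : List String) : pvSongsB Y = pvSplitSongs Y := by
  have h := splitA_general Y [] []
  simp only [List.nil_append] at h
  exact h.symm

-- ===== the two presence tests agree =====

theorem take_eq_iff (song seq : List String) :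
    song.take seq.length = seq ↔ seq <+: song := by
  constructor
  · intro h; rw [← h]; exact List.take_prefix _ _
  · intro h; exact (List.prefix_iff_eq_take.mp h).symm

theorem hasRun_iff (seq : List String) : ∀ (song : List String), pvHasRun song seq = true ↔ seq <:+: song := by
  intro song
  induction song with
  | nil =>
    cases seq with
    | nil => simp [pvHasRun]
    | cons a s => simp [pvHasRun, List.infix_nil]
  | cons x rest ih =>
    rw [pvHasRun]
    by_cases hp : (x :: rest).take seq.length = seq
    · simp only [beq_iff_eq, if_pos hp, true_iff]
      exact ((take_eq_iff _ _).mp hp).isInfix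
    · simp only [beq_iff_eq, if_neg hp]
      rw [ih, List.infix_cons_iff]
      constructor
      · exact Or.inr
      · rintro (h | h)
        · exact absurd ((take_eq_iff _ _).mpr h) hp
        · exact h

theorem hasSeq_iff (seq song : List String) : pvHasSeq song seq = true ↔ seq <:+: song := by
  unfold pvHasSeq
  rw [List.any_eq_true]
  constructor
  · rintro ⟨i, hi, hslice⟩
    rw [PySem.List.mem_pyRange_one] at hi
    obtain ⟨h0, hlt⟩ := hi
    obtain ⟨k, rfl⟩ : ∃ k : Nat, i = (k : Int) := ⟨i.toNat, (Int.toNat_of_nonneg h0).symm⟩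
    rw [show ((k : Int) + (seq.length : Int)) = ((k + seq.length : Nat) : Int) by push_cast; ring,
      PySem.List.slice_natCast] at hslice
    rw [beq_iff_eq] at hslice
    simp only [Nat.add_sub_cancel_left] at hslice
    have hpre : seq <+: song.drop k := by rw [← hslice]; exact List.take_prefix _ _
    obtain ⟨t, ht⟩ := hpre
    exact ⟨song.take k, t, by rw [List.append_assoc, ht, List.take_append_drop]⟩
  · rintro ⟨s, t, rfl⟩
    refine ⟨(s.length : Int), ?_, ?_⟩
    · rw [PySem.List.mem_pyRange_one]
      constructor
      · positivity
      · simp [List.length_append]; omega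
    · rw [show ((s.length : Int) + (seq.length : Int)) = ((s.length + seq.length : Nat) : Int) by push_cast; ring,
        PySem.List.slice_natCast]
      simp only [Nat.add_sub_cancel_left, beq_iff_eq]
      rw [List.append_assoc, List.drop_left, List.take_left]

theorem hasRun_eq (song seq : List String) : pvHasRun song seq = pvHasSeq song seq := by
  cases h : pvHasSeq song seq
  · cases h2 : pvHasRun song seq
    · rfl
    · exact absurd ((hasSeq_iff seq song).mpr ((hasRun_iff seq song).mp h2)) (by simp [h])
  · exact (hasRun_iff seq song).mpr ((hasSeq_iff seq song).mp h)

-- the combined validity test both programs apply, as a Bool predicate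
def pvCond (t : String) : Bool :=
  decide (t ≠ "" ∧ t ≠ "None" ∧ 1 < (pvClean t).toList.length)

-- the cleaned forms of the valid tokens, in order, with duplicates
def pvCleanL (tokens : List String) : List String := (tokens.filter pvCond).map pvClean

-- A's per-token count is a countP over the split songs
theorem cntA_eq_countP (Y : List String) (tc : String) :
    count_token_presence_in_songs Y tc
      = ((pvSplitSongs Y).countP (fun song => pvHasSeq song (pvSeq tc)) : Int) := by
  unfold count_token_presence_in_songs
  rw [PySem.List.foldl_if_add_one]
  simp

-- a string with more than one character is nonempty
theorem ne_empty_of_len (s : String) (h : 1 < s.toList.length) : s ≠ "" := by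
  intro he; subst he; simp at h

theorem pvCleanL_cons (t : String) (ts : List String) :
    pvCleanL (t :: ts) = if pvCond t then pvClean t :: pvCleanL ts else pvCleanL ts := by
  unfold pvCleanL
  rw [List.filter_cons]
  by_cases h : pvCond t <;> simp [h]

-- ===== B's candidate builder =====

theorem builder_eq (tokens : List String) :
    ∀ (s : PySem.Set String) (c : List String), (∀ x, x ∈ s ↔ x ∈ c) →
    (tokens.foldl (fun (st : PySem.Set String × List String) token =>
      if token ≠ "" ∧ token ≠ "None" then
        let tc := pvClean token
        if 1 < tc.toList.length ∧ tc ∉ st.1 then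
          (PySem.Set.add st.1 tc, st.2 ++ [tc])
        else st
      else st) (s, c)).2 = PySem.Set.update c (pvCleanL tokens) := by
  induction tokens with
  | nil => intro s c h; simp [pvCleanL, PySem.Set.update_nil]
  | cons t ts ih =>
    intro s c h
    simp only [List.foldl_cons]
    rw [pvCleanL_cons]
    by_cases h1 : t ≠ "" ∧ t ≠ "None"
    · by_cases h2 : 1 < (pvClean t).toList.length
      · have hc : pvCond t = true := decide_eq_true ⟨h1.1, h1.2, h2⟩
        rw [if_pos hc, PySem.Set.update_cons, if_pos h1]
        by_cases h3 : pvClean t ∈ s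
        · have h3c : pvClean t ∈ c := (h _).mp h3
          simp only [if_neg (show ¬ (1 < (pvClean t).toList.length ∧ pvClean t ∉ s) from
            fun hh => hh.2 h3)]
          rw [ih s c h, PySem.Set.add_of_mem h3c]
        · have h3c : pvClean t ∉ c := fun hx => h3 ((h _).mpr hx)
          simp only [if_pos (⟨h2, h3⟩ : (1 < (pvClean t).toList.length ∧ pvClean t ∉ s))]
          rw [ih (s.add (pvClean t)) (c ++ [pvClean t])
            (by intro x; rw [PySem.Set.mem_add, h x]; simp), PySem.Set.add_of_not_mem h3c]
      · have hc : pvCond t = false := decide_eq_false (fun hh => h2 hh.2.2)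
        rw [if_pos h1]
        simp only [if_neg (show ¬ (1 < (pvClean t).toList.length ∧ pvClean t ∉ s) from
          fun hh => h2 hh.1)]
        rw [if_neg (show ¬ (pvCond t = true) by rw [hc]; simp)]
        exact ih s c h
    · have hc : pvCond t = false := decide_eq_false (fun hh => h1 ⟨hh.1, hh.2.1⟩)
      rw [if_neg h1, if_neg (show ¬ (pvCond t = true) by rw [hc]; simp)]
      exact ih s c h

theorem candidates_eq (tokens : List String) :
    (tokens.foldl (fun (st : PySem.Set String × List String) token =>
      if token ≠ "" ∧ token ≠ "None" then
        let tc := pvClean token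
        if 1 < tc.toList.length ∧ tc ∉ st.1 then
          (PySem.Set.add st.1 tc, st.2 ++ [tc])
        else st
      else st) (PySem.Set.empty, ([] : List String))).2 = PySem.Set.ofList (pvCleanL tokens) := by
  rw [builder_eq tokens PySem.Set.empty [] (by intro x; rfl)]
  exact PySem.Set.update_empty _

-- ===== the counting dict =====

theorem fold_inner_not_mem (song : List String) (cs : List String) (tc : String) (h : tc ∉ cs) :
    ∀ d : PySem.Dict String Int,
    (cs.foldl (fun d c => if pvHasRun song (pvSeq c) then d.modify c 0 (· + 1) else d) d).getD tc 0
      = d.getD tc 0 := by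
  induction cs with
  | nil => intro d; rfl
  | cons c cs ih =>
    intro d
    rw [List.foldl_cons, ih (fun hm => h (List.mem_cons_of_mem _ hm))]
    by_cases hs : pvHasRun song (pvSeq c)
    · rw [if_pos hs, PySem.Dict.getD_modify_of_ne _ _ _ (fun he => h (List.mem_cons.mpr (Or.inl he)))]
    · rw [if_neg hs]

theorem fold_inner_mem (song : List String) (cs : List String) (tc : String)
    (hnd : cs.Nodup) (h : tc ∈ cs) :
    ∀ d : PySem.Dict String Int,
    (cs.foldl (fun d c => if pvHasRun song (pvSeq c) then d.modify c 0 (· + 1) else d) d).getD tc 0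
      = d.getD tc 0 + (if pvHasRun song (pvSeq tc) then 1 else 0) := by
  induction cs with
  | nil => exact absurd h List.not_mem_nil
  | cons c cs ih =>
    intro d
    rw [List.foldl_cons]
    by_cases he : tc = c
    · subst he
      have hn : tc ∉ cs := (List.nodup_cons.mp hnd).1
      rw [fold_inner_not_mem song cs tc hn]
      by_cases hs : pvHasRun song (pvSeq tc)
      · rw [if_pos hs, if_pos hs, PySem.Dict.getD_modify_self]
      · rw [if_neg hs, if_neg hs, add_zero]
    · have hm : tc ∈ cs := (List.mem_cons.mp h).resolve_left he
      rw [ih (List.nodup_cons.mp hnd).2 hm]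
      by_cases hs : pvHasRun song (pvSeq c)
      · rw [if_pos hs, PySem.Dict.getD_modify_of_ne _ _ _ he]
      · rw [if_neg hs]

theorem fold_songs (songs : List (List String)) (cs : List String) (tc : String)
    (hnd : cs.Nodup) (h : tc ∈ cs) :
    ∀ d : PySem.Dict String Int,
    (songs.foldl (fun (d : PySem.Dict String Int) song =>
        cs.foldl (fun d c => if pvHasRun song (pvSeq c) then d.modify c 0 (· + 1) else d) d) d).getD tc 0
      = d.getD tc 0 + (songs.countP (fun song => pvHasRun song (pvSeq tc)) : Int) := by
  induction songs with
  | nil => intro d; simp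
  | cons s ss ih =>
    intro d
    rw [List.foldl_cons, ih, fold_inner_mem s cs tc hnd h d, List.countP_cons]
    by_cases hs : pvHasRun s (pvSeq tc) <;> simp [hs] <;> ring

-- ===== set-building shapes =====

theorem ofList_filter (p : String → Bool) (l : List String) :
    PySem.Set.ofList (l.filter p) = (PySem.Set.ofList l).filter p := by
  induction l using List.reverseRecOn with
  | nil => rfl
  | append_singleton l x ih =>
    rw [List.filter_append, PySem.Set.ofList_append_singleton]
    by_cases hp : p x
    · have h1 : List.filter p [x] = [x] := by simp [hp]
      rw [h1, PySem.Set.ofList_append_singleton, ih]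
      by_cases hx : x ∈ PySem.Set.ofList l
      · have hxf : x ∈ (PySem.Set.ofList l).filter p := List.mem_filter.mpr ⟨hx, hp⟩
        rw [PySem.Set.add_of_mem hx, PySem.Set.add_of_mem hxf]
      · have hxf : x ∉ (PySem.Set.ofList l).filter p :=
          fun hm => hx (List.mem_filter.mp hm).1
        rw [PySem.Set.add_of_not_mem hx, PySem.Set.add_of_not_mem hxf, List.filter_append, h1]
    · have h1 : List.filter p [x] = [] := by simp [hp]
      rw [h1, List.append_nil, ih]
      by_cases hx : x ∈ PySem.Set.ofList l
      · rw [PySem.Set.add_of_mem hx]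
      · rw [PySem.Set.add_of_not_mem hx, List.filter_append, h1, List.append_nil]

theorem fold_add_if (p : String → Bool) (l : List String) :
    l.foldl (fun (res : PySem.Set String) x => if p x then PySem.Set.add res x else res) PySem.Set.empty
      = PySem.Set.ofList (l.filter p) := by
  rw [PySem.List.foldl_if_eq_foldl_filter p PySem.Set.add l PySem.Set.empty,
    PySem.Set.ofList_eq_foldl]
  rfl

-- A's main loop, reshaped
theorem a_fold_eq (Y : List String) (m : Int) (tokens : List String) :
    filter_tokens_by_frequency tokens Y m
      = PySem.Set.ofList ((pvCleanL tokens).filter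
          (fun tc => pvFloatGE (count_token_presence_in_songs Y tc) (pvTotalSongs Y) m)) := by
  unfold filter_tokens_by_frequency
  rw [PySem.List.foldl_congr_mem' tokens _
    (fun (acc : PySem.Set String) token =>
      if pvCond token
      then (if pvFloatGE (count_token_presence_in_songs Y (pvClean token)) (pvTotalSongs Y) m
            then PySem.Set.add acc (pvClean token) else acc)
      else acc) _ ?_]
  · rw [PySem.List.foldl_if_eq_foldl_filter pvCond _ tokens PySem.Set.empty]
    unfold pvCleanL
    rw [← List.foldl_map (f := pvClean)
      (g := fun (acc : PySem.Set String) tc =>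
        if pvFloatGE (count_token_presence_in_songs Y tc) (pvTotalSongs Y) m
        then PySem.Set.add acc tc else acc), fold_add_if]
  · intro t _ acc
    by_cases h1 : t ≠ "" ∧ t ≠ "None"
    · by_cases h2 : 1 < (pvClean t).toList.length
      · have hc : pvCond t = true := decide_eq_true ⟨h1.1, h1.2, h2⟩
        simp only [hc, if_true]
        rw [if_pos h1]
        show (if pvClean t ≠ "" ∧ 1 < (pvClean t).toList.length then
            (if pvFloatGE (count_token_presence_in_songs Y (pvClean t)) (pvTotalSongs Y) m
             then PySem.Set.add acc (pvClean t) else acc)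
          else acc) = _
        rw [if_pos ⟨ne_empty_of_len _ h2, h2⟩]
      · have hc : pvCond t = false := decide_eq_false (fun hh => h2 hh.2.2)
        simp only [hc, Bool.false_eq_true, if_false]
        rw [if_pos h1]
        show (if pvClean t ≠ "" ∧ 1 < (pvClean t).toList.length then
            (if pvFloatGE (count_token_presence_in_songs Y (pvClean t)) (pvTotalSongs Y) m
             then PySem.Set.add acc (pvClean t) else acc)
          else acc) = acc
        rw [if_neg (fun hh => h2 hh.2)]
    · have hc : pvCond t = false := decide_eq_false (fun hh => h1 ⟨hh.1, hh.2.1⟩)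
      simp only [hc, Bool.false_eq_true, if_false]
      rw [if_neg h1]

-- ===== VERDICT (by name: the statement is the Claim_ definition above) =====
theorem filter_tokens_by_frequency_spec : Claim_equal_filter_tokens_by_frequency := by
  intro tokens Y m _ _
  unfold Spec_filter_tokens_by_frequency
  rw [a_fold_eq]
  simp only [filter_tokens_by_frequency_alt]
  rw [candidates_eq tokens]
  have hnd : (PySem.Set.ofList (pvCleanL tokens)).Nodup := PySem.Set.nodup_ofList _
  have hq : ∀ tc ∈ PySem.Set.ofList (pvCleanL tokens),
      pvFloatGE ((List.foldl (fun d song =>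
          List.foldl (fun d tc =>
            if pvHasRun song (pvSeq tc) = true then d.modify tc 0 (· + 1) else d)
            d (PySem.Set.ofList (pvCleanL tokens))) PySem.Dict.empty (pvSongsB Y)).getD tc 0)
        (pvTotalSongs Y) m
      = pvFloatGE (count_token_presence_in_songs Y tc) (pvTotalSongs Y) m := by
    intro tc hm
    congr 1
    rw [fold_songs (pvSongsB Y) _ tc hnd hm PySem.Dict.empty,
      PySem.Dict.getD_empty, zero_add, cntA_eq_countP, songsB_eq]
    congr 1
    exact List.countP_congr (fun song _ => by rw [hasRun_eq])
  rw [List.filter_congr hq, ofList_filter, PySem.Set.ofList_eq_self_of_nodup _ (hnd.filter _)]
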